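-- pv_equiv track=rewrite | github.com/knitli/codeweaver | scripts/optimize_composite_checks.py | order_patterns_by_specificity
-- ===== SOURCE A (Python) =====
-- def order_patterns_by_specificity(patterns: list[str]) -> list[str]:
--     """Order patterns from specific to general.
--
--     Wildcards and greedy patterns should be checked last.
--
--     Args:
--         patterns: List of regex pattern strings
--
--     Returns:
--         Ordered list with specific patterns first, wildcards last
--     """
--     specific = []
--     wildcards = []
--
--     for p in patterns:
--         # Patterns with .+ or .* are wildcards
--         if ".+" in p or ".*" in p:
--             wildcards.append(p)
--         else:
--             specific.append(p)
--
--     return specific + wildcards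
-- ===== SOURCE B (Python) =====
-- def order_patterns_by_specificity(patterns: list[str]) -> list[str]:
--     """Order patterns from specific to general.
--
--     Single stable sort keyed on the wildcard predicate: specific patterns
--     (key False) come first, wildcard patterns (key True) last, relative
--     order within each group preserved.
--     """
--     return sorted(patterns, key=lambda p: ".+" in p or ".*" in p)
-- ===== Notes on version B (the rewrite author's own statement) =====
-- stated objective: idiomatic
-- what changed: Replaced the explicit two-accumulator partition loop with a single stable sort keyed on the boolean wildcard predicate; stability makes specific-before-wildcard with preserved relative order coincide with the partition.
import Mathlib
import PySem

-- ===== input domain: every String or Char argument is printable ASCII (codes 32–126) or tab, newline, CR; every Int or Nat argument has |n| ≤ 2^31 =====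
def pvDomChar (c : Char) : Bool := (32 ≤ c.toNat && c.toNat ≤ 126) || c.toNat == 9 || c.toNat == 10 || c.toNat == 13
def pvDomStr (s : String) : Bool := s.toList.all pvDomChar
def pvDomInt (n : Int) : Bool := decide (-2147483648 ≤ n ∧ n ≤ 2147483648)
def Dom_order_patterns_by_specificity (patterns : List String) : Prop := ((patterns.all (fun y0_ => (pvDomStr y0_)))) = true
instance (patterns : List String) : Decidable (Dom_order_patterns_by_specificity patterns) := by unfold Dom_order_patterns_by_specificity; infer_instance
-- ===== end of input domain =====

-- B replaces A's two-accumulator partition loop with one stable sort on the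
-- boolean wildcard key (idiomatic; same return value, no speed claim).


-- ===== PORT A =====
-- '".+" in p or ".*" in p'
def pvWild (p : String) : Bool := PySem.Str.isIn ".+" p || PySem.Str.isIn ".*" p

def order_patterns_by_specificity (patterns : List String) : List String :=
  -- the for-loop appending to 'specific'/'wildcards', then 'specific + wildcards'
  let acc := patterns.foldl
    (fun (acc : List String × List String) p =>
      if pvWild p then (acc.1, acc.2 ++ [p]) else (acc.1 ++ [p], acc.2))
    ([], [])
  acc.1 ++ acc.2

-- ===== PORT B =====
-- sorted(patterns, key=lambda p: ".+" in p or ".*" in p); bool key ported as Int 0/1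
def order_patterns_by_specificity_alt (patterns : List String) : List String :=
  PySem.List.sorted patterns (fun p => if pvWild p then (1 : Int) else 0) false

-- ===== PRECONDITION & SPEC =====
def Spec_order_patterns_by_specificity (patterns : List String) (out : List String) : Prop := out = order_patterns_by_specificity_alt patterns
instance (patterns : List String) (out : List String) : Decidable (Spec_order_patterns_by_specificity patterns out) := by unfold Spec_order_patterns_by_specificity; infer_instance

-- ===== CLAIM (what is proved, stated in full; the proofs are below) =====
def Claim_equal_order_patterns_by_specificity : Prop := ∀ (patterns : List String), Dom_order_patterns_by_specificity patterns → Spec_order_patterns_by_specificity patterns (order_patterns_by_specificity patterns)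

-- ===== LEMMAS AND PROOFS =====

-- the 0/1 sort key
def pvKey (p : String) : Int := if pvWild p then 1 else 0

theorem pvKey_le_one (p : String) : pvKey p ≤ 1 := by
  unfold pvKey; split <;> omega

-- inserting an element whose key is maximal lands at the end
theorem insertBy_wild (x : String) (hx : pvWild x = true) (ys : List String) :
    PySem.List.insertBy (fun a b => decide (pvKey a < pvKey b)) x ys = ys ++ [x] := by
  apply PySem.List.insertBy_of_forall_not_before
  intro y _
  simp only [decide_eq_false_iff_not, not_lt, pvKey, hx, if_true]
  exact pvKey_le_one y

-- inserting a specific (key 0) element into specifics ++ wildcards lands between them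
theorem insertBy_specific (x : String) (hx : pvWild x = false)
    (s w : List String) (hs : ∀ y ∈ s, pvWild y = false) (hw : ∀ y ∈ w, pvWild y = true) :
    PySem.List.insertBy (fun a b => decide (pvKey a < pvKey b)) x (s ++ w)
      = s ++ [x] ++ w := by
  induction s with
  | nil =>
    cases w with
    | nil => rfl
    | cons y ys =>
      have hy := hw y (by simp)
      show PySem.List.insertBy _ x (y :: ys) = _
      rw [show PySem.List.insertBy (fun a b => decide (pvKey a < pvKey b)) x (y :: ys)
          = if decide (pvKey x < pvKey y) then x :: y :: ys else
              y :: PySem.List.insertBy (fun a b => decide (pvKey a < pvKey b)) x ys from rfl]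
      simp [pvKey, hx, hy]
  | cons z zs ih =>
    have hz := hs z (by simp)
    have ih' := ih (fun y hy => hs y (by simp [hy]))
    show PySem.List.insertBy _ x (z :: (zs ++ w)) = _
    rw [show PySem.List.insertBy (fun a b => decide (pvKey a < pvKey b)) x (z :: (zs ++ w))
        = if decide (pvKey x < pvKey z) then x :: z :: (zs ++ w) else
            z :: PySem.List.insertBy (fun a b => decide (pvKey a < pvKey b)) x (zs ++ w) from rfl]
    have hd : decide (pvKey x < pvKey z) = false := by simp [pvKey, hx, hz]
    rw [hd, if_neg (by simp), ih']
    simp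

-- invariant of the insertion-sort fold: specifics then wildcards, each in arrival order
theorem foldl_insertBy_partition (xs : List String) :
    ∀ (s w : List String), (∀ y ∈ s, pvWild y = false) → (∀ y ∈ w, pvWild y = true) →
    xs.foldl (fun acc x => PySem.List.insertBy (fun a b => decide (pvKey a < pvKey b)) x acc) (s ++ w)
      = (s ++ xs.filter (fun p => !pvWild p)) ++ (w ++ xs.filter pvWild) := by
  induction xs with
  | nil => intro s w _ _; simp
  | cons x xs ih =>
    intro s w hs hw
    by_cases hx : pvWild x = true
    · have : PySem.List.insertBy (fun a b => decide (pvKey a < pvKey b)) x (s ++ w)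
          = s ++ (w ++ [x]) := by rw [insertBy_wild x hx]; simp
      simp only [List.foldl_cons, this]
      rw [ih s (w ++ [x]) hs (by intro y hy; rcases List.mem_append.1 hy with h | h
                                 · exact hw y h
                                 · simp at h; simp [h, hx])]
      simp [hx]
    · have hx' : pvWild x = false := by simpa using hx
      have : PySem.List.insertBy (fun a b => decide (pvKey a < pvKey b)) x (s ++ w)
          = (s ++ [x]) ++ w := by rw [insertBy_specific x hx' s w hs hw]
      simp only [List.foldl_cons, this]
      rw [ih (s ++ [x]) w (by intro y hy; rcases List.mem_append.1 hy with h | h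
                              · exact hs y h
                              · simp at h; simp [h, hx']) hw]
      simp [hx']

-- B's sort computes filter-specific ++ filter-wildcard
theorem alt_eq_filters (patterns : List String) :
    order_patterns_by_specificity_alt patterns
      = patterns.filter (fun p => !pvWild p) ++ patterns.filter pvWild := by
  unfold order_patterns_by_specificity_alt
  rw [show PySem.List.sorted patterns (fun p => if pvWild p then (1 : Int) else 0) false
      = patterns.foldl (fun acc x =>
          PySem.List.insertBy (fun a b => decide (pvKey a < pvKey b)) x acc) []
      from PySem.List.sorted_eq_foldl_insertBy ..]
  have := foldl_insertBy_partition patterns [] [] (by simp) (by simp)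
  simpa using this

-- A's pair fold computes the two filters
theorem foldl_pair_eq (xs : List String) :
    ∀ (a b : List String),
    xs.foldl (fun (acc : List String × List String) p =>
        if pvWild p then (acc.1, acc.2 ++ [p]) else (acc.1 ++ [p], acc.2)) (a, b)
      = (a ++ xs.filter (fun p => !pvWild p), b ++ xs.filter pvWild) := by
  induction xs with
  | nil => intro a b; simp
  | cons x xs ih =>
    intro a b
    by_cases hx : pvWild x = true
    · simp [List.foldl_cons, hx, ih]
    · have hx' : pvWild x = false := by simpa using hx
      simp [List.foldl_cons, hx', ih]

-- ===== VERDICT (by name: the statement is the Claim_ definition above) =====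
theorem order_patterns_by_specificity_spec : Claim_equal_order_patterns_by_specificity := by
  intro patterns _
  show order_patterns_by_specificity patterns = order_patterns_by_specificity_alt patterns
  unfold order_patterns_by_specificity
  rw [foldl_pair_eq patterns [] [], alt_eq_filters]
  simp
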